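-- pv_equiv track=rewrite | github.com/yutaweb/Atcoder | ABC/Beginner Contest 221/B-typo.py | check
-- ===== SOURCE A (Python) =====
-- def check(s, t):
--     if s == t:
--         return True
--
--     for i in range(len(s) - 1):
--         s_copy = s.copy()
--         temp = s_copy[i]
--         s_copy[i] = s_copy[i+1]
--         s_copy[i+1] = temp
--         if s_copy == t:
--             return True
--
--     return False
-- ===== SOURCE B (Python) =====
-- def check(s, t):
--     # O(n): collect differing positions in one pass; equal, or exactly two
--     # adjacent mirrored mismatches, means one adjacent swap (or none) fixes s.
--     if len(s) != len(t):
--         return False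
--     d = [i for i in range(len(s)) if s[i] != t[i]]
--     if not d:
--         return True
--     if len(d) != 2:
--         return False
--     i, j = d
--     return j == i + 1 and s[i] == t[j] and s[j] == t[i]
-- ===== Notes on version B (the rewrite author's own statement) =====
-- stated objective: faster
-- what changed: Instead of trying every adjacent swap on a fresh copy and comparing whole lists (quadratic), B makes one pass collecting the differing indices and accepts iff there are none, or exactly two that are adjacent and mirrored.
import Mathlib
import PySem

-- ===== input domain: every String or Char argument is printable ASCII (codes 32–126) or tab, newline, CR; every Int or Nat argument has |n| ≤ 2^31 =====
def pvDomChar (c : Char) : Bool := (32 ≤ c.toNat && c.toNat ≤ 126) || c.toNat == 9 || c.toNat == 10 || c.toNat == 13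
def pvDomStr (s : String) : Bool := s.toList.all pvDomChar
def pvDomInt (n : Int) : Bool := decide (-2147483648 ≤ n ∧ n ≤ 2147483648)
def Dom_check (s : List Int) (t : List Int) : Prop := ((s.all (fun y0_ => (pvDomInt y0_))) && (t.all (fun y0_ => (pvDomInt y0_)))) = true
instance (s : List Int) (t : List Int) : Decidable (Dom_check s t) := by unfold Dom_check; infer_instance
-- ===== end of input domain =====

-- B replaces A's try-every-adjacent-swap-and-compare scan (quadratic) by one pass
-- collecting the differing indices (objective: faster, measured by the check).

-- ===== PORT A =====
-- loop body of A: s_copy = s.copy(); temp = s_copy[i]; s_copy[i] = s_copy[i+1]; s_copy[i+1] = temp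
-- (indices i, i+1 are always in range for i in range(len(s)-1), so pyGetD/pySetD are exact)
def pvSwapAdj (s : List Int) (i : Int) : List Int :=
  PySem.List.pySetD (PySem.List.pySetD s i (PySem.List.pyGetD s (i + 1) 0)) (i + 1)
    (PySem.List.pyGetD s i 0)

def check (s : List Int) (t : List Int) : Bool :=
  if s = t then true
  else
    -- for i in range(len(s) - 1): … if s_copy == t: return True
    (PySem.List.pyRange 0 ((s.length : Int) - 1) 1).any (fun i => decide (pvSwapAdj s i = t))

-- ===== PORT B =====
-- d = [i for i in range(len(s)) if s[i] != t[i]]  (indices in range, getD is exact)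
def pvDiffs (s t : List Int) : List Nat :=
  (List.range s.length).filter (fun i => decide (s.getD i 0 ≠ t.getD i 0))

def check_alt (s : List Int) (t : List Int) : Bool :=
  if s.length = t.length then
    match pvDiffs s t with
    | [] => true
    | [i, j] => j == i + 1 && s.getD i 0 == t.getD j 0 && s.getD j 0 == t.getD i 0
    | _ => false
  else false

-- ===== PRECONDITION & SPEC =====
def Spec_check (s : List Int) (t : List Int) (out : Bool) : Prop := out = check_alt s t
instance (s : List Int) (t : List Int) (out : Bool) : Decidable (Spec_check s t out) := by unfold Spec_check; infer_instance

-- ===== CLAIM (what is proved, stated in full; the proofs are below) =====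
def Claim_equal_check : Prop := ∀ (s : List Int) (t : List Int), Dom_check s t → Spec_check s t (check s t)

-- ===== LEMMAS AND PROOFS =====

-- A's swap, stated over Nat indices in range
theorem pvSwapAdj_natCast (s : List Int) (k : Nat) :
    pvSwapAdj s (k : Int) = (s.set k (s.getD (k+1) 0)).set (k+1) (s.getD k 0) := by
  unfold pvSwapAdj
  rw [show ((k : Int) + 1) = ((k+1 : Nat) : Int) by push_cast; ring,
    PySem.List.pyGetD_natCast, PySem.List.pyGetD_natCast,
    PySem.List.pySetD_natCast, PySem.List.pySetD_natCast]

theorem check_true_iff (s t : List Int) :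
    check s t = true ↔ s = t ∨ ∃ k : Nat, k + 1 < s.length ∧
      (s.set k (s.getD (k+1) 0)).set (k+1) (s.getD k 0) = t := by
  by_cases h : s = t
  · constructor
    · intro _; exact Or.inl h
    · intro _; unfold check; rw [if_pos h]
  · simp only [check, if_neg h, List.any_eq_true, PySem.List.mem_pyRange_one, decide_eq_true_eq]
    constructor
    · rintro ⟨i, ⟨h0, hlt⟩, heq⟩
      refine Or.inr ⟨i.toNat, by omega, ?_⟩
      rw [← pvSwapAdj_natCast, Int.toNat_of_nonneg h0]; exact heq
    · rintro (heq | ⟨k, hk, heq⟩)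
      · exact absurd heq h
      · exact ⟨(k : Int), ⟨Int.natCast_nonneg k, by omega⟩, by rw [pvSwapAdj_natCast]; exact heq⟩

-- extensionality through getD, the view both ports share
theorem getD_ext (s t : List Int) (hlen : s.length = t.length)
    (h : ∀ m, m < s.length → s.getD m 0 = t.getD m 0) : s = t := by
  apply List.ext_getElem hlen
  intro m hm hm'
  have := h m hm
  rwa [List.getD_eq_getElem _ _ hm, List.getD_eq_getElem _ _ hm'] at this

-- what A's adjacent swap holds at each position
theorem swap_getD (s : List Int) (k : Nat) (_hk : k + 1 < s.length) (m : Nat) (hm : m < s.length) :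
    ((s.set k (s.getD (k+1) 0)).set (k+1) (s.getD k 0)).getD m 0
      = if m = k + 1 then s.getD k 0 else if m = k then s.getD (k+1) 0 else s.getD m 0 := by
  rw [List.getD_eq_getElem _ _ (by simpa using hm), List.getElem_set, List.getElem_set]
  split_ifs <;> first | rfl | omega | rw [List.getD_eq_getElem _ _ hm]

theorem mem_pvDiffs (s t : List Int) (m : Nat) :
    m ∈ pvDiffs s t ↔ m < s.length ∧ s.getD m 0 ≠ t.getD m 0 := by
  simp [pvDiffs, List.mem_filter, List.mem_range]

theorem pvDiffs_nil_iff (s t : List Int) (hlen : s.length = t.length) :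
    pvDiffs s t = [] ↔ s = t := by
  rw [List.eq_nil_iff_forall_not_mem]
  constructor
  · intro h
    apply getD_ext s t hlen
    intro m hm
    have := h m
    rw [mem_pvDiffs] at this
    tauto
  · rintro rfl m h
    rw [mem_pvDiffs] at h; exact h.2 rfl

theorem pvDiffs_pair (s t : List Int) (k : Nat)
    (h : ∀ m, m ∈ pvDiffs s t ↔ m = k ∨ m = k + 1) :
    pvDiffs s t = [k, k+1] := by
  have hnd : (pvDiffs s t).Nodup := List.Nodup.filter _ List.nodup_range
  have hpw : (pvDiffs s t).Pairwise (· < ·) := List.Pairwise.filter _ List.pairwise_lt_range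
  have hperm : List.Perm (pvDiffs s t) [k, k+1] :=
    (List.perm_ext_iff_of_nodup hnd (by simp)).2 (by intro a; rw [h a]; simp)
  exact hperm.eq_of_pairwise (fun a b _ _ h1 h2 => absurd h2 (Nat.lt_asymm h1))
    hpw (List.pairwise_pair.mpr (by omega))

theorem check_alt_true_iff (s t : List Int) (hlen : s.length = t.length) (hne : s ≠ t) :
    check_alt s t = true ↔ ∃ k : Nat, pvDiffs s t = [k, k+1] ∧
      s.getD k 0 = t.getD (k+1) 0 ∧ s.getD (k+1) 0 = t.getD k 0 := by
  simp only [check_alt, if_pos hlen]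
  rcases hd : pvDiffs s t with _ | ⟨i, _ | ⟨j, _ | _⟩⟩
  · exact absurd ((pvDiffs_nil_iff s t hlen).1 hd) hne
  · simp
  · simp only [Bool.and_eq_true, beq_iff_eq]
    constructor
    · rintro ⟨⟨hj, h1⟩, h2⟩
      subst hj; exact ⟨i, rfl, h1, h2⟩
    · rintro ⟨k, hk, h1, h2⟩
      obtain ⟨rfl, rfl⟩ : i = k ∧ j = k + 1 := by simpa using hk
      exact ⟨⟨rfl, h1⟩, h2⟩
  · simp

theorem main_eq (s t : List Int) : check s t = check_alt s t := by
  by_cases hlen : s.length = t.length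
  case neg =>
    -- lengths differ: A never matches (swaps keep the length), B returns false
    have hne : s ≠ t := fun h => hlen (h ▸ rfl)
    rw [check_alt, if_neg hlen]
    rw [← Bool.not_eq_true, check_true_iff]
    rintro (h | ⟨k, hk, heq⟩)
    · exact hne h
    · apply hlen; rw [← heq]; simp
  case pos =>
    by_cases hne : s = t
    · subst hne
      have hd : pvDiffs s s = [] := (pvDiffs_nil_iff s s rfl).2 rfl
      unfold check check_alt
      rw [if_pos rfl, if_pos rfl, hd]
    · rw [Bool.eq_iff_iff, check_true_iff, check_alt_true_iff s t hlen hne]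
      constructor
      · rintro (h | ⟨k, hk, heq⟩)
        · exact absurd h hne
        · -- the successful swap pins down the diff set {k, k+1}
          have hks : k < s.length := by omega
          have hgt : ∀ m, m < s.length →
              t.getD m 0 = if m = k + 1 then s.getD k 0 else if m = k then s.getD (k+1) 0 else s.getD m 0 := by
            intro m hm
            rw [← heq, swap_getD s k hk m hm]
          have hdiff : s.getD k 0 ≠ s.getD (k+1) 0 := by
            intro hsame
            apply hne
            apply getD_ext s t hlen
            intro m hm
            rw [hgt m hm]
            split_ifs with e1 e2
            · subst e1; exact hsame.symm
            · subst e2; exact hsame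
            · rfl
          refine ⟨k, pvDiffs_pair s t k ?_, ?_, ?_⟩
          · intro m
            rw [mem_pvDiffs]
            constructor
            · rintro ⟨hm, hne'⟩
              by_contra hmk
              rw [not_or] at hmk
              exact hne' (by rw [hgt m hm, if_neg hmk.2, if_neg hmk.1])
            · rintro (rfl | rfl)
              · exact ⟨hks, by rw [hgt m hks, if_neg (by omega), if_pos rfl]; exact hdiff⟩
              · exact ⟨hk, by rw [hgt _ hk, if_pos rfl]; exact fun h => hdiff h.symm⟩
          · rw [hgt (k+1) hk, if_pos rfl]
          · rw [hgt k hks, if_neg (by omega), if_pos rfl]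
      · rintro ⟨k, hd, h1, h2⟩
        have hk1s : k + 1 < s.length := by
          have : (k+1) ∈ pvDiffs s t := by rw [hd]; simp
          exact ((mem_pvDiffs s t (k+1)).1 this).1
        refine Or.inr ⟨k, hk1s, ?_⟩
        apply getD_ext _ _ (by simp [hlen])
        intro m hm
        have hms : m < s.length := by simpa using hm
        rw [swap_getD s k hk1s m hms]
        split_ifs with e1 e2
        · subst e1; exact h1
        · subst e2; exact h2
        · have hnm : m ∉ pvDiffs s t := by rw [hd]; simp; omega
          rw [mem_pvDiffs, not_and, not_not] at hnm
          exact hnm hms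

-- ===== VERDICT (by name: the statement is the Claim_ definition above) =====
theorem check_spec : Claim_equal_check := by
  intro s t _
  exact main_eq s t
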